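-- pv_equiv track=rewrite | github.com/biocvazar/machinelearning | l4.py | sort_v
-- ===== SOURCE A (Python) =====
-- def sort_v(x:list, y:list):
--     icf = 0
--     new_y = []
--     for i in range(len(x)):
--         if (x[i] != x[i - 1]) and i != 0:
--             new_y.append(sorted(y[icf:i]))
--             icf = i
--     new_y.append(sorted(y[icf:]))
--     y = []
--     for list in new_y:
--         y.extend(list)
--     return y
-- ===== SOURCE B (Python) =====
-- def sort_v(x: list, y: list):
--     # Label every element of y with its segment id, then sort all of y once
--     # by the (segment id, value) pair; the single stable sort replaces A's
--     # per-segment sorts and concatenation.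
--     gid = []
--     g = 0
--     for i in range(len(y)):
--         if 0 < i < len(x) and x[i] != x[i - 1]:
--             g += 1
--         gid.append(g)
--     return [v for _, v in sorted(zip(gid, y))]
-- ===== Notes on version B (the rewrite author's own statement) =====
-- stated objective: alternative
-- what changed: B replaces A's per-segment sorts (detect boundaries, sort each slice, concatenate) by a decorate-sort-undecorate scheme: label each y element with its segment id via a running counter and perform ONE global stable sort of (segment id, value) pairs, then project the values.
import Mathlib
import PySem

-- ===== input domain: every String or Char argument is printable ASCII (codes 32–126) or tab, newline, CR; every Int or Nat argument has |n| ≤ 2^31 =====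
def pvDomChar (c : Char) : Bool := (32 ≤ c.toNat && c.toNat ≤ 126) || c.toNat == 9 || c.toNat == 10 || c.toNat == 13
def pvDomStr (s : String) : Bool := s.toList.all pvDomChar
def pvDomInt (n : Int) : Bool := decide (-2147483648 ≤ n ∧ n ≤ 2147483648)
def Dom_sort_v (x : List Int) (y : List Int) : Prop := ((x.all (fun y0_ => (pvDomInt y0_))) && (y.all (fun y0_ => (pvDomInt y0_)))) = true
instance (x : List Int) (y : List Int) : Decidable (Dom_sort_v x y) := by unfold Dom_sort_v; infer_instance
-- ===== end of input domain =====

-- B uses a different algorithm: instead of A's boundary detection + per-segment sorts +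
-- concatenation, B labels each y element with its segment id and performs ONE global stable
-- sort of (segment id, value) pairs, then projects the values.

-- ===== PORT A =====
-- A's loop over range(len(x)) carrying (icf, new_y); then the final segment, then flatten.
def sort_v (x : List Int) (y : List Int) : List Int :=
  let st := (PySem.List.pyRange 0 (x.length : Int) 1).foldl
    (fun (st : Int × List (List Int)) i =>
      if PySem.List.pyGetD x i 0 ≠ PySem.List.pyGetD x (i - 1) 0 ∧ i ≠ 0 then
        (i, st.2 ++ [PySem.List.sorted (PySem.List.slice y (some st.1) (some i)) (fun v => v) false])
      else st)
    (0, [])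
  let new_y := st.2 ++ [PySem.List.sorted (PySem.List.slice y (some st.1) none) (fun v => v) false]
  new_y.foldl (fun acc l => acc ++ l) []

-- ===== PORT B =====
-- gid: one pass over range(len(y)) with a running counter g, appending g after each step;
-- then [v for _, v in sorted(zip(gid, y))] — a single stable sort with the tuple key.
def sort_v_alt (x : List Int) (y : List Int) : List Int :=
  let st := (PySem.List.pyRange 0 (y.length : Int) 1).foldl
    (fun (st : Int × List Int) i =>
      let g := if 0 < i ∧ i < (x.length : Int) ∧ PySem.List.pyGetD x i 0 ≠ PySem.List.pyGetD x (i - 1) 0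
               then st.1 + 1 else st.1
      (g, st.2 ++ [g]))
    (0, [])
  (PySem.List.sorted2 (st.2.zip y) Prod.fst Prod.snd false).map Prod.snd

-- ===== PRECONDITION & SPEC =====
def Spec_sort_v (x : List Int) (y : List Int) (out : List Int) : Prop := out = sort_v_alt x y
instance (x : List Int) (y : List Int) (out : List Int) : Decidable (Spec_sort_v x y out) := by unfold Spec_sort_v; infer_instance

-- ===== CLAIM (what is proved, stated in full; the proofs are below) =====
def Claim_equal_sort_v : Prop := ∀ (x : List Int) (y : List Int), Dom_sort_v x y → Spec_sort_v x y (sort_v x y)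

-- ===== LEMMAS AND PROOFS =====

-- the sorted slice y[a:b?]
def seg (y : List Int) (a : Int) (b? : Option Int) : List Int :=
  PySem.List.sorted (PySem.List.slice y a b?) (fun v => v) false

-- the segments of y cut first at c, then at each element of L, the last running to the end
def segs (y : List Int) (c : Int) : List Int → List (List Int)
  | [] => [seg y c none]
  | i :: L => seg y c (some i) :: segs y i L

-- the same segments, unsorted, each element labeled with its segment id (first id g)
def labSegs (y : List Int) (g c : Int) : List Int → List (Int × Int)
  | [] => (PySem.List.slice y (some c) none).map (fun v => (g, v))
  | i :: L => (PySem.List.slice y (some c) (some i)).map (fun v => (g, v)) ++ labSegs y (g + 1) i L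

-- the segments, sorted, labeled with their segment ids
def sortSegs (y : List Int) (g c : Int) : List Int → List (Int × Int)
  | [] => (seg y c none).map (fun v => (g, v))
  | i :: L => (seg y c (some i)).map (fun v => (g, v)) ++ sortSegs y (g + 1) i L

-- the number of boundaries of x at positions 1..i (B's running counter after step i)
def cnt (x : List Int) (i : Int) : Int :=
  ((PySem.List.pyRange 1 (i + 1) 1).countP
    (fun j => decide (0 < j ∧ j < (x.length : Int) ∧
      PySem.List.pyGetD x j 0 ≠ PySem.List.pyGetD x (j - 1) 0)) : Int)

-- a slice stopping at or past len(y) is a slice to the end, for a nonnegative start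
lemma slice_some_len (y : List Int) (c i : Int) (hc : 0 ≤ c) (hi : (y.length : Int) ≤ i) :
    PySem.List.slice y (some c) (some i) = PySem.List.slice y (some c) none := by
  rw [PySem.List.slice_toNat y hc (le_trans (Int.natCast_nonneg _) hi), PySem.List.slice_from y hc]
  exact List.take_of_length_le (by simp; omega)

-- A's boundary loop over any cut list produces exactly the segment list
lemma foldA_segs (y : List Int) (L : List Int) (c : Int) (acc : List (List Int)) :
    (L.foldl (fun (st : Int × List (List Int)) i =>
        (i, st.2 ++ [PySem.List.sorted (PySem.List.slice y (some st.1) (some i)) (fun v => v) false])) (c, acc)).2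
      ++ [PySem.List.sorted (PySem.List.slice y (some ((L.foldl (fun (st : Int × List (List Int)) i =>
        (i, st.2 ++ [PySem.List.sorted (PySem.List.slice y (some st.1) (some i)) (fun v => v) false])) (c, acc)).1)) none) (fun v => v) false]
    = acc ++ segs y c L := by
  induction L generalizing c acc with
  | nil => simp [segs, seg]
  | cons i L ih =>
      simp only [List.foldl_cons]
      rw [ih]
      simp [segs, seg]

-- [y[i] for i in range(c, b)] is the slice y[c:b]
lemma mapGet_pyRange (y : List Int) (c b : Int) (hc : 0 ≤ c) (hb0 : 0 ≤ b) (hb : b ≤ (y.length : Int)) :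
    (PySem.List.pyRange c b 1).map (fun i => PySem.List.pyGetD y i 0)
      = PySem.List.slice y (some c) (some b) := by
  rw [PySem.List.slice_toNat y hc hb0, PySem.List.pyRange_one c b]
  rw [List.map_map]
  apply List.ext_getElem
  · simp; omega
  · intro j h1 h2
    simp only [List.getElem_map, List.getElem_range, Function.comp_apply,
      List.getElem_take, List.getElem_drop]
    have hj : (j : Int) < b - c := by
      have := h1; simp at this; omega
    rw [PySem.List.pyGetD_eq_getElem y 0 (by omega) (by omega)]
    congr 1
    omega

lemma mapGet_pyRange_none (y : List Int) (c : Int) (hc : 0 ≤ c) :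
    (PySem.List.pyRange c (y.length : Int) 1).map (fun i => PySem.List.pyGetD y i 0)
      = PySem.List.slice y (some c) none := by
  rw [mapGet_pyRange y c _ hc (Int.natCast_nonneg _) le_rfl,
    slice_some_len y c _ hc le_rfl]

-- all labeled segments starting at or past len(y) are empty
lemma labSegs_empty (y : List Int) : ∀ (L : List Int) (g c : Int), 0 ≤ c → (y.length : Int) ≤ c →
    (∀ b ∈ L, c < b) → L.Pairwise (· < ·) → labSegs y g c L = [] := by
  intro L
  induction L with
  | nil =>
      intro g c hc hlen _ _
      simp only [labSegs, List.map_eq_nil_iff]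
      rw [PySem.List.slice_from y hc]
      exact List.drop_eq_nil_of_le (by omega)
  | cons i L ih =>
      intro g c hc hlen hb hp
      have hci : c < i := hb i (by simp)
      simp only [labSegs, List.append_eq_nil_iff]
      constructor
      · simp only [List.map_eq_nil_iff]
        rw [PySem.List.slice_toNat y hc (by omega)]
        rw [List.drop_eq_nil_of_le (by omega)]
        simp
      · exact ih (g + 1) i (by omega) (by omega)
          (fun b hbm => (List.pairwise_cons.mp hp).1 b hbm) (List.pairwise_cons.mp hp).2

-- the map of (g + #boundaries ≤ i, y[i]) over range(c, len(y)) is the labeled segment list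
lemma map_cntL_eq_labSegs (y : List Int) : ∀ (L : List Int) (g c : Int), 0 ≤ c →
    (∀ b ∈ L, c < b) → L.Pairwise (· < ·) →
    (PySem.List.pyRange c (y.length : Int) 1).map
        (fun i => (g + ((L.countP (fun b => decide (b ≤ i))) : Int), PySem.List.pyGetD y i 0))
      = labSegs y g c L := by
  intro L
  induction L with
  | nil =>
      intro g c hc _ _
      simp only [List.countP_nil, Nat.cast_zero, add_zero, labSegs]
      rw [← mapGet_pyRange_none y c hc, List.map_map]
      rfl
  | cons i L ih =>
      intro g c hc hb hp
      have hci : c < i := hb i (by simp)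
      have hiL : ∀ b ∈ L, i < b := fun b hbm => (List.pairwise_cons.mp hp).1 b hbm
      by_cases hin : i ≤ (y.length : Int)
      · rw [PySem.List.pyRange_one_append c i (y.length : Int) (by omega) hin, List.map_append]
        have h1 : (PySem.List.pyRange c i 1).map
              (fun j => (g + (((i :: L).countP (fun b => decide (b ≤ j))) : Int), PySem.List.pyGetD y j 0))
            = (PySem.List.slice y (some c) (some i)).map (fun v => (g, v)) := by
          rw [List.map_congr_left (g := fun j => (g, PySem.List.pyGetD y j 0))
            (fun j hj => by
              have hjb := PySem.List.mem_pyRange_one.mp hj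
              have hz : ((i :: L).countP (fun b => decide (b ≤ j))) = 0 :=
                List.countP_eq_zero.mpr (fun b hbm => by
                  rcases List.mem_cons.mp hbm with rfl | hbm'
                  · simp only [decide_eq_true_eq]; omega
                  · have := hiL b hbm'
                    simp only [decide_eq_true_eq]; omega)
              rw [hz]; simp)]
          rw [← mapGet_pyRange y c i hc (by omega) hin, List.map_map]
          rfl
        have h2 : (PySem.List.pyRange i (y.length : Int) 1).map
              (fun j => (g + (((i :: L).countP (fun b => decide (b ≤ j))) : Int), PySem.List.pyGetD y j 0))
            = labSegs y (g + 1) i L := by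
          rw [List.map_congr_left
            (g := fun j => (g + 1 + ((L.countP (fun b => decide (b ≤ j))) : Int), PySem.List.pyGetD y j 0))
            (fun j hj => by
              have hjb := PySem.List.mem_pyRange_one.mp hj
              rw [List.countP_cons]
              have : decide (i ≤ j) = true := by simp only [decide_eq_true_eq]; omega
              rw [this]
              simp only [if_true]
              push_cast
              ring_nf)]
          exact ih (g + 1) i (by omega) hiL (List.pairwise_cons.mp hp).2
        rw [h1, h2]
        rfl
      · rw [not_le] at hin
        have hall : (PySem.List.pyRange c (y.length : Int) 1).map
              (fun j => (g + (((i :: L).countP (fun b => decide (b ≤ j))) : Int), PySem.List.pyGetD y j 0))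
            = (PySem.List.slice y (some c) none).map (fun v => (g, v)) := by
          rw [List.map_congr_left (g := fun j => (g, PySem.List.pyGetD y j 0))
            (fun j hj => by
              have hjb := PySem.List.mem_pyRange_one.mp hj
              have hz : ((i :: L).countP (fun b => decide (b ≤ j))) = 0 :=
                List.countP_eq_zero.mpr (fun b hbm => by
                  rcases List.mem_cons.mp hbm with rfl | hbm'
                  · simp only [decide_eq_true_eq]; omega
                  · have := hiL b hbm'
                    simp only [decide_eq_true_eq]; omega)
              rw [hz]; simp)]
          rw [← mapGet_pyRange_none y c hc, List.map_map]
          rfl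
        rw [hall]
        show _ = labSegs y g c (i :: L)
        simp only [labSegs]
        rw [slice_some_len y c i hc (by omega),
          labSegs_empty y L (g + 1) i (by omega) (by omega) hiL (List.pairwise_cons.mp hp).2]
        simp

-- B's gid-building fold: running counter and list of counts
lemma gidFold (x : List Int) : ∀ (n : Nat),
    (PySem.List.pyRange 0 (n : Int) 1).foldl
      (fun (st : Int × List Int) i =>
        let g := if 0 < i ∧ i < (x.length : Int) ∧ PySem.List.pyGetD x i 0 ≠ PySem.List.pyGetD x (i - 1) 0
                 then st.1 + 1 else st.1
        (g, st.2 ++ [g]))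
      (0, [])
    = (cnt x ((n : Int) - 1), (PySem.List.pyRange 0 (n : Int) 1).map (cnt x)) := by
  intro n
  induction n with
  | zero =>
      rw [Nat.cast_zero, PySem.List.pyRange_one_eq_nil (le_refl 0)]
      simp only [List.foldl_nil, List.map_nil, Prod.mk.injEq, and_true]
      unfold cnt
      rw [show (0 : Int) - 1 + 1 = 0 by ring, PySem.List.pyRange_one_eq_nil (by omega)]
      rfl
  | succ n ih =>
      have hstep : (if 0 < (n : Int) ∧ (n : Int) < (x.length : Int) ∧
            PySem.List.pyGetD x (n : Int) 0 ≠ PySem.List.pyGetD x ((n : Int) - 1) 0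
          then cnt x ((n : Int) - 1) + 1 else cnt x ((n : Int) - 1)) = cnt x (n : Int) := by
        by_cases hn0 : (n : Int) = 0
        · rw [hn0]
          rw [if_neg (by rintro ⟨h, -⟩; omega)]
          unfold cnt
          rw [show (0 : Int) - 1 + 1 = 0 by ring, PySem.List.pyRange_one_eq_nil (by omega),
            show (0 : Int) + 1 = 1 by ring, PySem.List.pyRange_one_eq_nil (by omega)]
        · have h1 : (1 : Int) ≤ (n : Int) := by omega
          unfold cnt
          rw [PySem.List.pyRange_one_succ_right h1, List.countP_append,
            show (n : Int) - 1 + 1 = (n : Int) by ring]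
          rw [List.countP_cons, List.countP_nil]
          by_cases h : 0 < (n : Int) ∧ (n : Int) < (x.length : Int) ∧
              PySem.List.pyGetD x (n : Int) 0 ≠ PySem.List.pyGetD x ((n : Int) - 1) 0
          · rw [if_pos h, if_pos (by simpa using h)]
            push_cast
            ring
          · rw [if_neg h, if_neg (by simpa using h)]
            push_cast
            ring
      rw [show ((n + 1 : Nat) : Int) = (n : Int) + 1 by push_cast; ring,
        PySem.List.pyRange_one_succ_right (Int.natCast_nonneg n), List.foldl_append, ih,
        List.map_append]
      simp only [List.foldl_cons, List.foldl_nil, List.map_cons, List.map_nil]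
      rw [show (n : Int) + 1 - 1 = (n : Int) by ring]
      simp only [hstep]

-- the count over B's range equals the count of A's filtered boundary list up to i
lemma cnt_eq_cntL (x : List Int) (i : Int) (hi : 0 ≤ i) :
    cnt x i = (((PySem.List.pyRange 1 (x.length : Int) 1).filter
        (fun j => decide (PySem.List.pyGetD x j 0 ≠ PySem.List.pyGetD x (j - 1) 0))).countP
        (fun b => decide (b ≤ i)) : Int) := by
  rw [List.countP_filter]
  by_cases hx : (x.length : Int) < 1
  · rw [PySem.List.pyRange_one_eq_nil (by omega), List.countP_nil]
    unfold cnt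
    rw [List.countP_eq_zero.mpr (fun j hj => by
      have := PySem.List.mem_pyRange_one.mp hj
      simp only [decide_eq_true_eq]
      rintro ⟨-, h2, -⟩; omega)]
  · rw [not_lt] at hx
    have e1 : cnt x i = (((PySem.List.pyRange 1 (max (i + 1) (x.length : Int)) 1).countP
        (fun j => decide ((0 < j ∧ j < (x.length : Int) ∧
          PySem.List.pyGetD x j 0 ≠ PySem.List.pyGetD x (j - 1) 0) ∧ j ≤ i))) : Int) := by
      unfold cnt
      rw [PySem.List.pyRange_one_append 1 (i + 1) (max (i + 1) (x.length : Int)) (by omega)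
        (le_max_left _ _), List.countP_append]
      have hz : List.countP
          (fun j => decide ((0 < j ∧ j < (x.length : Int) ∧
            PySem.List.pyGetD x j 0 ≠ PySem.List.pyGetD x (j - 1) 0) ∧ j ≤ i))
          (PySem.List.pyRange (i + 1) (max (i + 1) (x.length : Int)) 1) = 0 :=
        List.countP_eq_zero.mpr (fun j hj => by
          have := PySem.List.mem_pyRange_one.mp hj
          simp only [decide_eq_true_eq]
          rintro ⟨-, h2⟩; omega)
      have hc : List.countP
          (fun j => decide (0 < j ∧ j < (x.length : Int) ∧
            PySem.List.pyGetD x j 0 ≠ PySem.List.pyGetD x (j - 1) 0))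
          (PySem.List.pyRange 1 (i + 1) 1)
        = List.countP
          (fun j => decide ((0 < j ∧ j < (x.length : Int) ∧
            PySem.List.pyGetD x j 0 ≠ PySem.List.pyGetD x (j - 1) 0) ∧ j ≤ i))
          (PySem.List.pyRange 1 (i + 1) 1) :=
        List.countP_congr (fun j hj => by
          have := PySem.List.mem_pyRange_one.mp hj
          simp only [decide_eq_true_eq]
          constructor
          · intro hA; exact ⟨hA, by omega⟩
          · rintro ⟨hA, -⟩; exact hA)
      rw [hz, hc, Nat.add_zero]
    have e2 : List.countP
        (fun a => decide (a ≤ i) &&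
          decide (PySem.List.pyGetD x a 0 ≠ PySem.List.pyGetD x (a - 1) 0))
        (PySem.List.pyRange 1 (x.length : Int) 1)
      = List.countP
        (fun j => decide ((0 < j ∧ j < (x.length : Int) ∧
          PySem.List.pyGetD x j 0 ≠ PySem.List.pyGetD x (j - 1) 0) ∧ j ≤ i))
        (PySem.List.pyRange 1 (max (i + 1) (x.length : Int)) 1) := by
      rw [PySem.List.pyRange_one_append 1 (x.length : Int) (max (i + 1) (x.length : Int)) (by omega)
        (le_max_right _ _), List.countP_append]
      have hz : List.countP
          (fun j => decide ((0 < j ∧ j < (x.length : Int) ∧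
            PySem.List.pyGetD x j 0 ≠ PySem.List.pyGetD x (j - 1) 0) ∧ j ≤ i))
          (PySem.List.pyRange (x.length : Int) (max (i + 1) (x.length : Int)) 1) = 0 :=
        List.countP_eq_zero.mpr (fun j hj => by
          have := PySem.List.mem_pyRange_one.mp hj
          simp only [decide_eq_true_eq]
          rintro ⟨⟨-, h2, -⟩, -⟩; omega)
      have hc : List.countP
          (fun a => decide (a ≤ i) &&
            decide (PySem.List.pyGetD x a 0 ≠ PySem.List.pyGetD x (a - 1) 0))
          (PySem.List.pyRange 1 (x.length : Int) 1)
        = List.countP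
          (fun j => decide ((0 < j ∧ j < (x.length : Int) ∧
            PySem.List.pyGetD x j 0 ≠ PySem.List.pyGetD x (j - 1) 0) ∧ j ≤ i))
          (PySem.List.pyRange 1 (x.length : Int) 1) :=
        List.countP_congr (fun j hj => by
          have := PySem.List.mem_pyRange_one.mp hj
          simp only [Bool.and_eq_true, decide_eq_true_eq]
          constructor
          · rintro ⟨h1, h2⟩; exact ⟨⟨by omega, by omega, h2⟩, h1⟩
          · rintro ⟨⟨-, -, h2⟩, h1⟩; exact ⟨h1, h2⟩)
      rw [hz, hc, Nat.add_zero]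
    rw [e1, e2]

-- zipping the gid map with y pairs each label with its element
lemma zip_map_cnt (x y : List Int) :
    ((PySem.List.pyRange 0 (y.length : Int) 1).map (cnt x)).zip y
      = (PySem.List.pyRange 0 (y.length : Int) 1).map
          (fun i => (cnt x i, PySem.List.pyGetD y i 0)) := by
  apply List.ext_getElem
  · simp [PySem.List.length_pyRange_one]
  · intro j h1 h2
    have hj : j < y.length := by
      simp [PySem.List.length_pyRange_one] at h2; omega
    rw [List.getElem_zip, List.getElem_map, List.getElem_map, PySem.List.getElem_pyRange_one]
    simp only [Prod.mk.injEq, true_and]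
    rw [show (0 : Int) + ((j : Nat) : Int) = ((j : Nat) : Int) by ring,
      PySem.List.pyGetD_eq_getElem y 0 (by omega) (by omega)]
    congr 1

-- Python's tuple sort is the stable sort under the lexicographic key
lemma sorted2_eq_sorted_lex (zs : List (Int × Int)) :
    PySem.List.sorted2 zs Prod.fst Prod.snd false
      = PySem.List.sorted zs (fun p => toLex p) false := by
  rw [PySem.List.sorted_eq_foldl_insertBy]
  show zs.foldl (fun acc p => PySem.List.insertBy
      (fun a b => decide (a.1 < b.1) || (!decide (b.1 < a.1) && decide (a.2 < b.2))) p acc) [] = _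
  have hfun : (fun (a b : Int × Int) => decide (a.1 < b.1) || (!decide (b.1 < a.1) && decide (a.2 < b.2)))
      = (fun (a b : Int × Int) => decide ((toLex a : Lex (Int × Int)) < toLex b)) := by
    funext a b
    by_cases h1 : a.1 < b.1 <;> by_cases h2 : b.1 < a.1 <;> by_cases h3 : a.2 < b.2 <;>
      simp [h1, h2, h3, Prod.Lex.lt_iff] <;> omega
  rw [hfun]

lemma sortSegs_perm (y : List Int) : ∀ (L : List Int) (g c : Int),
    (sortSegs y g c L).Perm (labSegs y g c L) := by
  intro L
  induction L with
  | nil => intro g c; exact (PySem.List.sorted_perm _ _ _).map _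
  | cons i L ih => intro g c; exact ((PySem.List.sorted_perm _ _ _).map _).append (ih (g + 1) i)

lemma sortSegs_fst_ge (y : List Int) : ∀ (L : List Int) (g c : Int),
    ∀ p ∈ sortSegs y g c L, g ≤ p.1 := by
  intro L
  induction L with
  | nil =>
      intro g c p hp
      simp only [sortSegs, List.mem_map] at hp
      obtain ⟨v, _, rfl⟩ := hp; simp
  | cons i L ih =>
      intro g c p hp
      rcases List.mem_append.mp hp with h | h
      · obtain ⟨v, _, rfl⟩ := List.mem_map.mp h; simp
      · exact le_trans (by omega) (ih (g + 1) i p h)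

lemma sortSegs_pairwise (y : List Int) : ∀ (L : List Int) (g c : Int),
    (sortSegs y g c L).Pairwise (fun a b => toLex a ≤ toLex b) := by
  intro L
  induction L with
  | nil =>
      intro g c
      simp only [sortSegs]
      rw [List.pairwise_map]
      refine (PySem.List.sorted_pairwise _ _).imp ?_
      intro a b h
      exact Prod.Lex.le_iff.mpr (Or.inr ⟨rfl, h⟩)
  | cons i L ih =>
      intro g c
      simp only [sortSegs]
      rw [List.pairwise_append]
      refine ⟨?_, ih (g + 1) i, ?_⟩
      · rw [List.pairwise_map]
        refine (PySem.List.sorted_pairwise _ _).imp ?_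
        intro a b h
        exact Prod.Lex.le_iff.mpr (Or.inr ⟨rfl, h⟩)
      · intro a ha b hb
        obtain ⟨v, -, rfl⟩ := List.mem_map.mp ha
        have := sortSegs_fst_ge y L (g + 1) i b hb
        exact Prod.Lex.le_iff.mpr (Or.inl (by simpa using by omega))

lemma sorted2_labSegs (y : List Int) (L : List Int) (g c : Int) :
    PySem.List.sorted2 (labSegs y g c L) Prod.fst Prod.snd false = sortSegs y g c L := by
  rw [sorted2_eq_sorted_lex]
  apply PySem.List.eq_of_perm_of_pairwise_le_of_injective (fun p : Int × Int => toLex p)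
    toLex.injective
  · exact (PySem.List.sorted_perm _ _ _).trans (sortSegs_perm y L g c).symm
  · exact PySem.List.sorted_pairwise _ _
  · exact sortSegs_pairwise y L g c

lemma sortSegs_map_snd (y : List Int) : ∀ (L : List Int) (g c : Int),
    (sortSegs y g c L).map Prod.snd = (segs y c L).flatten := by
  intro L
  induction L with
  | nil => intro g c; simp [sortSegs, segs, List.map_map, seg]
  | cons i L ih =>
      intro g c
      simp only [sortSegs, segs, List.map_append, List.map_map, List.flatten_cons]
      rw [ih (g + 1) i]
      simp [seg]

theorem sort_v_eq_alt (x y : List Int) : sort_v x y = sort_v_alt x y := by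
  simp only [sort_v, sort_v_alt]
  -- A's side: boundary loop = segment list, final loop = flatten
  rw [PySem.List.foldl_ite_eq_foldl_filter]
  have hfilter : (PySem.List.pyRange 0 (x.length : Int) 1).filter
        (fun i => decide (PySem.List.pyGetD x i 0 ≠ PySem.List.pyGetD x (i - 1) 0 ∧ i ≠ 0))
      = (PySem.List.pyRange 1 (x.length : Int) 1).filter
        (fun i => decide (PySem.List.pyGetD x i 0 ≠ PySem.List.pyGetD x (i - 1) 0)) := by
    by_cases h0 : x.length = 0
    · rw [h0]
      rw [PySem.List.pyRange_one_eq_nil (by omega), PySem.List.pyRange_one_eq_nil (by omega)]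
      rfl
    · have h1 : (0 : Int) < (x.length : Int) := by exact_mod_cast Nat.pos_of_ne_zero h0
      rw [PySem.List.pyRange_one_cons h1, List.filter_cons]
      simp only [ne_eq, not_true_eq_false, and_false, decide_false, zero_add]
      exact List.filter_congr (fun i hi => by
        have := (PySem.List.mem_pyRange_one.mp hi).1
        simp [show i ≠ 0 by omega])
  rw [hfilter, PySem.List.foldl_append_eq_flatten, foldA_segs, List.nil_append]
  -- B's side: gid fold, zip, label counts, one lex sort
  rw [gidFold x y.length, zip_map_cnt x y]
  have hL : ∀ b ∈ (PySem.List.pyRange 1 (x.length : Int) 1).filter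
      (fun i => decide (PySem.List.pyGetD x i 0 ≠ PySem.List.pyGetD x (i - 1) 0)), 0 < b :=
    fun b hb => by
      have := (PySem.List.mem_pyRange_one.mp (List.mem_of_mem_filter hb)).1
      omega
  have hmapc : (PySem.List.pyRange 0 (y.length : Int) 1).map
        (fun i => (cnt x i, PySem.List.pyGetD y i 0))
      = (PySem.List.pyRange 0 (y.length : Int) 1).map
        (fun i => ((0 : Int) + ((((PySem.List.pyRange 1 (x.length : Int) 1).filter
            (fun j => decide (PySem.List.pyGetD x j 0 ≠ PySem.List.pyGetD x (j - 1) 0))).countP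
            (fun b => decide (b ≤ i))) : Int), PySem.List.pyGetD y i 0)) :=
    List.map_congr_left (fun i hi => by
      have := (PySem.List.mem_pyRange_one.mp hi).1
      rw [cnt_eq_cntL x i (by omega), zero_add])
  rw [hmapc, map_cntL_eq_labSegs y _ 0 0 le_rfl hL
    (List.Pairwise.filter _ (PySem.List.pairwise_lt_pyRange_one 1 (x.length : Int)))]
  rw [sorted2_labSegs, sortSegs_map_snd, List.nil_append]

-- ===== VERDICT (by name: the statement is the Claim_ definition above) =====
theorem sort_v_spec : Claim_equal_sort_v := by
  intro x y _
  exact sort_v_eq_alt x y
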